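-- pv_equiv track=rewrite | github.com/paiml/depyler | examples/hard_clustering_1d.py | kmeans_1d
-- ===== SOURCE A (Python) =====
-- def abs_val(x: int) -> int:
--     if x < 0:
--         return -x
--     return x
--
-- def assign_clusters(data: list[int], centroids: list[int]) -> list[int]:
--     # Assign each data point to nearest centroid
--     assignments: list[int] = []
--     i: int = 0
--     while i < len(data):
--         best_cluster: int = 0
--         best_dist: int = abs_val(data[i] - centroids[0])
--         j: int = 1
--         while j < len(centroids):
--             dist: int = abs_val(data[i] - centroids[j])
--             if dist < best_dist:
--                 best_dist = dist
--                 best_cluster = j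
--             j = j + 1
--         assignments.append(best_cluster)
--         i = i + 1
--     return assignments
--
-- def update_centroids(data: list[int], assignments: list[int], k: int) -> list[int]:
--     sums: list[int] = []
--     counts: list[int] = []
--     i: int = 0
--     while i < k:
--         sums.append(0)
--         counts.append(0)
--         i = i + 1
--     j: int = 0
--     while j < len(data):
--         cluster: int = assignments[j]
--         sums[cluster] = sums[cluster] + data[j]
--         counts[cluster] = counts[cluster] + 1
--         j = j + 1
--     centroids: list[int] = []
--     i = 0
--     while i < k:
--         if counts[i] > 0:
--             centroids.append(sums[i] // counts[i])
--         else: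
--             centroids.append(0)
--         i = i + 1
--     return centroids
--
-- def kmeans_1d(data: list[int], k: int, max_iter: int) -> list[int]:
--     # Initialize centroids from first k data points
--     centroids: list[int] = []
--     i: int = 0
--     while i < k:
--         centroids.append(data[i])
--         i = i + 1
--     iteration: int = 0
--     while iteration < max_iter:
--         assignments: list[int] = assign_clusters(data, centroids)
--         new_centroids: list[int] = update_centroids(data, assignments, k)
--         changed: int = 0
--         j: int = 0
--         while j < k:
--             if new_centroids[j] != centroids[j]:
--                 changed = 1
--             j = j + 1
--         centroids = new_centroids
--         if changed == 0:
--             break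
--         iteration = iteration + 1
--     return centroids
-- ===== SOURCE B (Python) =====
-- def kmeans_1d(data: list[int], k: int, max_iter: int) -> list[int]:
--     centroids = [data[i] for i in range(k)]
--     for _ in range(max_iter):
--         labels = [min(range(len(centroids)), key=lambda j: abs(x - centroids[j]))
--                   for x in data]
--         new = []
--         for i in range(k):
--             pts = [x for x, lab in zip(data, labels) if lab == i]
--             new.append(sum(pts) // len(pts) if pts else 0)
--         if new == centroids:
--             return new
--         centroids = new
--     return centroids
-- ===== Notes on version B (the rewrite author's own statement) =====
-- stated objective: alternative
-- what changed: A's hand-tracked (best_cluster, best_dist) while-loops, in-place sum/count arrays indexed by cluster and a changed-flag loop are replaced by min-with-key nearest assignment, a per-cluster filter/sum pass, and a direct list-equality convergence test.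
import Mathlib
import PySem

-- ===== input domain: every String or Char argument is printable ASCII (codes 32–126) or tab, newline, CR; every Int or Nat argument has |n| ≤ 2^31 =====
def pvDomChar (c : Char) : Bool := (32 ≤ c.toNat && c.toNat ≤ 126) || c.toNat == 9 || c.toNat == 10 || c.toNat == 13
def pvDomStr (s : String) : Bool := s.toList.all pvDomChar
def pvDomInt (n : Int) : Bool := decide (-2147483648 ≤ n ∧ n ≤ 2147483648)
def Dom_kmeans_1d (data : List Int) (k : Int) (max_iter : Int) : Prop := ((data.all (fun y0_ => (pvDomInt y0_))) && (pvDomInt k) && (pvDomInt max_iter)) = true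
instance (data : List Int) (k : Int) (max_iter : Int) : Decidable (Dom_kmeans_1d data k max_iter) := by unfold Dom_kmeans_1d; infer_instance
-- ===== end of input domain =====

-- B replaces A's hand-tracked nearest-centroid while-loops and in-place sum/count arrays by
-- min-with-key assignment and a per-cluster filter/sum pass (objective: alternative decomposition,
-- same asymptotic cost).

-- ===== PORT A =====
def abs_val (x : Int) : Int := if x < 0 then -x else x

-- inner while-j loop of assign_clusters: state (best_cluster, best_dist), j over 1..len-1.
-- centroids[0] would raise in Python on empty centroids; such inputs are outside Pre_ (getD default unreachable there).
def assignOne (x : Int) (c : List Int) : Int :=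
  ((PySem.List.pyRange 1 (c.length : Int) 1).foldl
    (fun (s : Int × Int) (j : Int) =>
      let d := abs_val (x - PySem.List.pyGetD c j 0)
      if d < s.2 then (j, d) else s)
    (0, abs_val (x - PySem.List.pyGetD c 0 0))).1

def assign_clusters (data centroids : List Int) : List Int :=
  data.map (fun x => assignOne x centroids)

def update_centroids (data assignments : List Int) (k : Int) : List Int :=
  let sums0 : List Int := (PySem.List.pyRange 0 k 1).map (fun _ => 0)
  let counts0 : List Int := (PySem.List.pyRange 0 k 1).map (fun _ => 0)
  let sc := (data.zip assignments).foldl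
    (fun (s : List Int × List Int) (p : Int × Int) =>
      (s.1.set p.2.toNat (s.1.getD p.2.toNat 0 + p.1),
       s.2.set p.2.toNat (s.2.getD p.2.toNat 0 + 1)))
    (sums0, counts0)
  (PySem.List.pyRange 0 k 1).map (fun i =>
    if 0 < sc.2.getD i.toNat 0 then
      PySem.Int.floordiv (sc.1.getD i.toNat 0) (sc.2.getD i.toNat 0)
    else 0)

def kmeansLoopA (data : List Int) (k : Int) : Nat → List Int → List Int
  | 0, c => c
  | fuel+1, c =>
    let nc := update_centroids data (assign_clusters data c) k
    let changed := (PySem.List.pyRange 0 k 1).foldl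
      (fun ch j => if nc.getD j.toNat 0 ≠ c.getD j.toNat 0 then (1 : Int) else ch) 0
    if changed = 0 then nc else kmeansLoopA data k fuel nc

def kmeans_1d (data : List Int) (k : Int) (max_iter : Int) : List Int :=
  kmeansLoopA data k max_iter.toNat
    ((PySem.List.pyRange 0 k 1).map (fun i => PySem.List.pyGetD data i 0))

-- ===== PORT B =====
-- min(range(len(c)), key=lambda j: abs(x - c[j])); Python min raises on empty c,
-- which inside Pre_ only happens with data = [] where nearest is never called (getD default unreachable).
def nearest (x : Int) (c : List Int) : Int :=
  (PySem.List.min? (PySem.List.pyRange 0 (c.length : Int) 1)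
    (fun j => |x - PySem.List.pyGetD c j 0|)).getD 0

def stepB (data : List Int) (k : Int) (c : List Int) : List Int :=
  let labels := data.map (fun x => nearest x c)
  (PySem.List.pyRange 0 k 1).map (fun i =>
    let pts := ((data.zip labels).filter (fun p => p.2 = i)).map Prod.fst
    if pts = [] then 0 else PySem.Int.floordiv pts.sum (pts.length : Int))

def kmeansLoopB (data : List Int) (k : Int) : Nat → List Int → List Int
  | 0, c => c
  | fuel+1, c =>
    let nw := stepB data k c
    if nw = c then nw else kmeansLoopB data k fuel nw

def kmeans_1d_alt (data : List Int) (k : Int) (max_iter : Int) : List Int :=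
  kmeansLoopB data k max_iter.toNat
    ((PySem.List.pyRange 0 k 1).map (fun i => PySem.List.pyGetD data i 0))

-- ===== PRECONDITION & SPEC =====
-- Pre_ excludes exactly the inputs where Python A raises IndexError: k > len(data) with k ≥ 1
-- (initialisation reads data[i]), and k ≤ 0 with max_iter ≥ 1 and data nonempty (centroids[0] on []).
def Pre_kmeans_1d (data : List Int) (k : Int) (max_iter : Int) : Prop :=
  (1 ≤ k ∧ k ≤ (data.length : Int)) ∨ (k ≤ 0 ∧ (max_iter ≤ 0 ∨ data = []))
instance (data : List Int) (k : Int) (max_iter : Int) : Decidable (Pre_kmeans_1d data k max_iter) := by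
  unfold Pre_kmeans_1d; infer_instance

def pvWitness_kmeans_1d : List Int × Int × Int := ([1, 2, 9, 10], 2, 10)

def Spec_kmeans_1d (data : List Int) (k : Int) (max_iter : Int) (out : List Int) : Prop := out = kmeans_1d_alt data k max_iter
instance (data : List Int) (k : Int) (max_iter : Int) (out : List Int) : Decidable (Spec_kmeans_1d data k max_iter out) := by unfold Spec_kmeans_1d; infer_instance

-- ===== CLAIM (what is proved, stated in full; the proofs are below) =====
def Claim_equal_kmeans_1d : Prop := ∀ (data : List Int) (k : Int) (max_iter : Int), Dom_kmeans_1d data k max_iter → Pre_kmeans_1d data k max_iter → Spec_kmeans_1d data k max_iter (kmeans_1d data k max_iter)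

-- ===== LEMMAS AND PROOFS =====

theorem abs_val_eq (a : Int) : abs_val a = |a| := by
  unfold abs_val
  rcases lt_or_ge a 0 with h | h
  · rw [if_pos h, abs_of_neg h]
  · rw [if_neg (not_lt.mpr h), abs_of_nonneg h]

-- Python min (first minimum) on a nonempty list equals the strict-< argmin fold.
theorem min_cons_cons (K : Int → Int) (a b : Int) (t : List Int) :
    PySem.List.min? (a :: b :: t) K = PySem.List.min? ((if K b < K a then b else a) :: t) K := by
  by_cases h : K b < K a <;> simp [PySem.List.min?, h]

theorem min_cons_eq (K : Int → Int) : ∀ (t : List Int) (j0 : Int),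
    PySem.List.min? (j0 :: t) K
      = some (t.foldl (fun bc j => if K j < K bc then j else bc) j0) := by
  intro t
  induction t with
  | nil => intro j0; simp [PySem.List.min?]
  | cons j t ih =>
    intro j0
    rw [min_cons_cons, ih, List.foldl_cons]

-- A's (best_cluster, best_dist) fold computes the same argmin, caching the key.
theorem a_fold_eq (K : Int → Int) : ∀ (js : List Int) (b d : Int), d = K b →
    (js.foldl (fun (s : Int × Int) j => if K j < s.2 then (j, K j) else s) (b, d)).1
      = js.foldl (fun bc j => if K j < K bc then j else bc) b := by
  intro js
  induction js with
  | nil => intro b d _; rfl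
  | cons j t ih =>
    intro b d hd
    simp only [List.foldl_cons, hd]
    by_cases h : K j < K b
    · rw [if_pos h, if_pos h]; exact ih j (K j) rfl
    · rw [if_neg h, if_neg h]; exact ih b (K b) rfl

theorem assign_eq (x : Int) (c : List Int) : assignOne x c = nearest x c := by
  rcases eq_or_ne c [] with rfl | hc
  · simp [assignOne, nearest, PySem.List.min?]
  · have hlen : 0 < c.length := List.length_pos_iff.mpr hc
    unfold assignOne nearest
    rw [show PySem.List.pyRange 0 (c.length : Int) 1
          = 0 :: PySem.List.pyRange (0 + 1) (c.length : Int) 1 from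
        PySem.List.pyRange_one_cons (by exact_mod_cast hlen)]
    rw [min_cons_eq]
    simp only [abs_val_eq, Option.getD_some]
    have h01 : (0 : Int) + 1 = 1 := by norm_num
    rw [h01]
    exact a_fold_eq (fun j => |x - PySem.List.pyGetD c j 0|) _ 0 _ rfl

theorem nearest_range (x : Int) (c : List Int) (hc : c ≠ []) :
    0 ≤ nearest x c ∧ (nearest x c).toNat < c.length := by
  have hlen : 0 < c.length := List.length_pos_iff.mpr hc
  have hr : PySem.List.pyRange 0 (c.length : Int) 1
      = 0 :: PySem.List.pyRange (0 + 1) (c.length : Int) 1 :=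
    PySem.List.pyRange_one_cons (by exact_mod_cast hlen)
  have hm : PySem.List.min? (PySem.List.pyRange 0 (c.length : Int) 1)
      (fun j => |x - PySem.List.pyGetD c j 0|)
      = some ((PySem.List.pyRange (0 + 1) (c.length : Int) 1).foldl
          (fun bc j => if |x - PySem.List.pyGetD c j 0| < |x - PySem.List.pyGetD c bc 0| then j else bc) 0) := by
    rw [hr, min_cons_eq]
  have hmem := PySem.List.min?_mem hm
  rw [PySem.List.mem_pyRange_one] at hmem
  unfold nearest
  rw [hm]
  simp only [Option.getD_some]
  omega

-- array-accumulation characterisation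
theorem upd_spec : ∀ (ps : List (Int × Int)) (sums counts : List Int),
    sums.length = counts.length →
    (∀ p ∈ ps, 0 ≤ p.2 ∧ p.2.toNat < sums.length) →
    (ps.foldl (fun (s : List Int × List Int) (p : Int × Int) =>
        (s.1.set p.2.toNat (s.1.getD p.2.toNat 0 + p.1),
         s.2.set p.2.toNat (s.2.getD p.2.toNat 0 + 1))) (sums, counts)).1.length = sums.length ∧
    (ps.foldl (fun (s : List Int × List Int) (p : Int × Int) =>
        (s.1.set p.2.toNat (s.1.getD p.2.toNat 0 + p.1),
         s.2.set p.2.toNat (s.2.getD p.2.toNat 0 + 1))) (sums, counts)).2.length = counts.length ∧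
    ∀ i : Nat, i < sums.length →
      (ps.foldl (fun (s : List Int × List Int) (p : Int × Int) =>
        (s.1.set p.2.toNat (s.1.getD p.2.toNat 0 + p.1),
         s.2.set p.2.toNat (s.2.getD p.2.toNat 0 + 1))) (sums, counts)).1.getD i 0
          = sums.getD i 0 + ((ps.filter (fun p => p.2 = (i : Int))).map Prod.fst).sum ∧
      (ps.foldl (fun (s : List Int × List Int) (p : Int × Int) =>
        (s.1.set p.2.toNat (s.1.getD p.2.toNat 0 + p.1),
         s.2.set p.2.toNat (s.2.getD p.2.toNat 0 + 1))) (sums, counts)).2.getD i 0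
          = counts.getD i 0 + ((ps.filter (fun p => p.2 = (i : Int))).length : Int) := by
  intro ps
  induction ps with
  | nil => intro sums counts hlen _; simp
  | cons p t ih =>
    intro sums counts hlen hmem
    simp only [List.foldl_cons]
    obtain ⟨hp0, hplt⟩ := hmem p List.mem_cons_self
    have h1 := ih (sums.set p.2.toNat (sums.getD p.2.toNat 0 + p.1))
        (counts.set p.2.toNat (counts.getD p.2.toNat 0 + 1))
        (by simp [hlen]) (by
          intro q hq
          have := hmem q (List.mem_cons_of_mem p hq)
          simpa using this)
    obtain ⟨hl1, hl2, hgd⟩ := h1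
    refine ⟨by simpa using hl1, by simpa using hl2, ?_⟩
    intro i hi
    obtain ⟨hg1, hg2⟩ := hgd i (by simpa using hi)
    rw [hg1, hg2]
    by_cases hpi : p.2 = (i : Int)
    · have hti : p.2.toNat = i := by omega
      rw [hti] at *
      rw [List.filter_cons_of_pos (by simpa using hpi)]
      constructor
      · rw [show (sums.set i (sums.getD i 0 + p.1)).getD i 0 = sums.getD i 0 + p.1 by
          simp [List.getD_eq_getElem?_getD, hi]]
        simp [add_assoc]
      · rw [show (counts.set i (counts.getD i 0 + 1)).getD i 0 = counts.getD i 0 + 1 by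
          simp [List.getD_eq_getElem?_getD, hlen ▸ hi]]
        simp only [List.length_cons]
        push_cast
        ring
    · have hti : p.2.toNat ≠ i := by omega
      rw [List.filter_cons_of_neg (by simpa using hpi)]
      constructor
      · rw [show (sums.set p.2.toNat (sums.getD p.2.toNat 0 + p.1)).getD i 0 = sums.getD i 0 by
          simp [List.getD_eq_getElem?_getD, List.getElem?_set_ne hti]]
      · rw [show (counts.set p.2.toNat (counts.getD p.2.toNat 0 + 1)).getD i 0 = counts.getD i 0 by
          simp [List.getD_eq_getElem?_getD, List.getElem?_set_ne hti]]

theorem getD_map_zero (l : List Int) (j : Nat) :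
    (l.map (fun _ => (0 : Int))).getD j 0 = 0 := by
  simp only [List.getD_eq_getElem?_getD, List.getElem?_map]
  cases l[j]? <;> simp

theorem step_eq (data c : List Int) (k : Int)
    (hlen : c.length = k.toNat) (hne : data ≠ [] → c ≠ []) :
    update_centroids data (assign_clusters data c) k = stepB data k c := by
  unfold update_centroids assign_clusters stepB
  simp only [assign_eq]
  have hslen : ((PySem.List.pyRange 0 k 1).map (fun _ => (0 : Int))).length = k.toNat := by
    rw [List.length_map, PySem.List.length_pyRange_one]; omega
  have hmem : ∀ p ∈ data.zip (data.map (fun x => nearest x c)),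
      0 ≤ p.2 ∧ p.2.toNat < ((PySem.List.pyRange 0 k 1).map (fun _ => (0 : Int))).length := by
    intro p hp
    have hc : c ≠ [] := hne (by rintro rfl; simp at hp)
    have h2 : p.2 ∈ data.map (fun x => nearest x c) := (List.of_mem_zip hp).2
    obtain ⟨x, _, hx⟩ := List.mem_map.mp h2
    have hr := nearest_range x c hc
    rw [hx] at hr
    rw [hslen]
    omega
  obtain ⟨_, _, hgd⟩ := upd_spec (data.zip (data.map (fun x => nearest x c)))
    ((PySem.List.pyRange 0 k 1).map (fun _ => (0 : Int)))
    ((PySem.List.pyRange 0 k 1).map (fun _ => (0 : Int))) rfl hmem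
  apply List.map_congr_left
  intro i hi
  rw [PySem.List.mem_pyRange_one] at hi
  have hit : i.toNat < ((PySem.List.pyRange 0 k 1).map (fun _ => (0 : Int))).length := by
    rw [hslen]; omega
  obtain ⟨hg1, hg2⟩ := hgd i.toNat hit
  rw [hg1, hg2]
  simp only [getD_map_zero, zero_add, Int.toNat_of_nonneg hi.1]
  by_cases hf : (data.zip (data.map (fun x => nearest x c))).filter (fun p => p.2 = i) = []
  · simp [hf]
  · have hpos : 0 < ((data.zip (data.map (fun x => nearest x c))).filter
        (fun p => p.2 = i)).length := List.length_pos_iff.mpr hf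
    rw [if_pos (by exact_mod_cast hpos), if_neg (by simp [hf]), List.length_map]

theorem length_stepB (data : List Int) (k : Int) (c : List Int) :
    (stepB data k c).length = k.toNat := by
  unfold stepB
  rw [List.length_map, PySem.List.length_pyRange_one]
  omega

theorem changed_fold (nc c : List Int) : ∀ (l : List Int) (a : Int),
    l.foldl (fun ch j => if nc.getD j.toNat 0 ≠ c.getD j.toNat 0 then (1 : Int) else ch) a
      = if (∃ j ∈ l, nc.getD j.toNat 0 ≠ c.getD j.toNat 0) then 1 else a := by
  intro l
  induction l with
  | nil => intro a; simp
  | cons j t ih =>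
    intro a
    simp only [List.foldl_cons]
    by_cases h : nc.getD j.toNat 0 = c.getD j.toNat 0
    · rw [if_neg (not_not_intro h), ih]
      have hiff : (∃ x ∈ j :: t, nc.getD x.toNat 0 ≠ c.getD x.toNat 0)
          ↔ ∃ x ∈ t, nc.getD x.toNat 0 ≠ c.getD x.toNat 0 := by
        simp only [List.mem_cons]
        constructor
        · rintro ⟨x, hx | hx, hP⟩
          · exact absurd (hx ▸ h) hP
          · exact ⟨x, hx, hP⟩
        · rintro ⟨x, hx, hP⟩
          exact ⟨x, Or.inr hx, hP⟩
      rw [if_congr hiff rfl rfl]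
    · rw [if_pos h, ih]
      have hw : ∃ x ∈ j :: t, nc.getD x.toNat 0 ≠ c.getD x.toNat 0 :=
        ⟨j, List.mem_cons_self, h⟩
      rw [if_pos hw]
      split_ifs <;> rfl

theorem eq_of_getD (nc c : List Int) (k : Int) (h1 : nc.length = k.toNat) (h2 : c.length = k.toNat)
    (h : ∀ j ∈ PySem.List.pyRange 0 k 1, nc.getD j.toNat 0 = c.getD j.toNat 0) : nc = c := by
  apply List.ext_getElem (by omega)
  intro n hn1 hn2
  have hj : (n : Int) ∈ PySem.List.pyRange 0 k 1 := by
    rw [PySem.List.mem_pyRange_one]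
    omega
  have := h (n : Int) hj
  simpa [List.getD_eq_getElem?_getD, List.getElem?_eq_getElem, hn1, hn2] using this

theorem loop_eq (data : List Int) (k : Int) (hk : data = [] ∨ 0 < k) :
    ∀ (fuel : Nat) (c : List Int), c.length = k.toNat →
      kmeansLoopA data k fuel c = kmeansLoopB data k fuel c := by
  intro fuel
  induction fuel with
  | zero => intro c _; rfl
  | succ n ih =>
    intro c hc
    have hne : data ≠ [] → c ≠ [] := by
      intro hd
      rcases hk with rfl | hkpos
      · exact absurd rfl hd
      · exact List.length_pos_iff.mp (by omega)
    simp only [kmeansLoopA, kmeansLoopB]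
    rw [step_eq data c k hc hne]
    rw [changed_fold]
    by_cases heq : stepB data k c = c
    · have hno : ¬ ∃ j ∈ PySem.List.pyRange 0 k 1,
          (stepB data k c).getD j.toNat 0 ≠ c.getD j.toNat 0 := by
        rintro ⟨j, _, hP⟩
        exact hP (by rw [heq])
      rw [if_neg hno, if_pos rfl, if_pos heq]
    · have hdiff : ∃ j ∈ PySem.List.pyRange 0 k 1,
          (stepB data k c).getD j.toNat 0 ≠ c.getD j.toNat 0 := by
        by_contra hall
        push Not at hall
        exact heq (eq_of_getD _ _ k (length_stepB data k c) hc hall)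
      rw [if_pos hdiff, if_neg (by norm_num), if_neg heq]
      exact ih _ (length_stepB data k c)

-- ===== VERDICT (by name: the statement is the Claim_ definition above) =====
theorem kmeans_1d_spec : Claim_equal_kmeans_1d := by
  intro data k max_iter _ hpre
  unfold Spec_kmeans_1d kmeans_1d kmeans_1d_alt
  rcases hpre with ⟨h1, _⟩ | ⟨hk0, hrest⟩
  · exact loop_eq data k (Or.inr (by omega)) _ _
      (by rw [List.length_map, PySem.List.length_pyRange_one]; omega)
  · rcases hrest with hmi | rfl
    · have h0 : max_iter.toNat = 0 := by omega
      rw [h0]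
      rfl
    · exact loop_eq [] k (Or.inl rfl) _ _
        (by rw [List.length_map, PySem.List.length_pyRange_one]; omega)
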